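-- pv_equiv track=rewrite | github.com/gwozai/VoiceForge | src/utils/helpers.py | get_language_from_voice
-- ===== SOURCE A (Python) =====
-- def get_language_from_voice(voice: str) -> str:
--     """从语音名称推断语言"""
--     language_map = {
--         'zh-CN': 'zh-CN',
--         'zh-TW': 'zh-TW',
--         'zh-HK': 'zh-HK',
--         'en-US': 'en-US',
--         'en-GB': 'en-GB',
--         'ja-JP': 'ja-JP',
--         'ko-KR': 'ko-KR',
--         'de-DE': 'de-DE',
--         'fr-FR': 'fr-FR',
--         'es-ES': 'es-ES',
--         'it-IT': 'it-IT',
--         'pt-BR': 'pt-BR',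
--         'ru-RU': 'ru-RU',
--         'ar-SA': 'ar-SA',
--         'hi-IN': 'hi-IN',
--     }
--
--     for lang_code, lang in language_map.items():
--         if voice.startswith(lang_code):
--             return lang
--
--     # OpenAI语音默认为英语
--     openai_voices = ['alloy', 'echo', 'fable', 'onyx', 'nova', 'shimmer']
--     if voice in openai_voices:
--         return 'en-US'
--
--     return 'en-US'  # 默认
-- ===== SOURCE B (Python) =====
-- _LANG_CODES = {
--     'zh-CN', 'zh-TW', 'zh-HK', 'en-US', 'en-GB', 'ja-JP', 'ko-KR',
--     'de-DE', 'fr-FR', 'es-ES', 'it-IT', 'pt-BR', 'ru-RU', 'ar-SA', 'hi-IN',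
-- }
--
--
-- def get_language_from_voice(voice: str) -> str:
--     """从语音名称推断语言"""
--     prefix = voice[:5]
--     return prefix if prefix in _LANG_CODES else 'en-US'
-- ===== Notes on version B (the rewrite author's own statement) =====
-- stated objective: simpler
-- what changed: Replaces the sequential startswith scan over the dict and the redundant openai_voices branch with one 5-character slice and a single set-membership test (all language codes are exactly 5 chars, so the slice equals any matching startswith).
import Mathlib
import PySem

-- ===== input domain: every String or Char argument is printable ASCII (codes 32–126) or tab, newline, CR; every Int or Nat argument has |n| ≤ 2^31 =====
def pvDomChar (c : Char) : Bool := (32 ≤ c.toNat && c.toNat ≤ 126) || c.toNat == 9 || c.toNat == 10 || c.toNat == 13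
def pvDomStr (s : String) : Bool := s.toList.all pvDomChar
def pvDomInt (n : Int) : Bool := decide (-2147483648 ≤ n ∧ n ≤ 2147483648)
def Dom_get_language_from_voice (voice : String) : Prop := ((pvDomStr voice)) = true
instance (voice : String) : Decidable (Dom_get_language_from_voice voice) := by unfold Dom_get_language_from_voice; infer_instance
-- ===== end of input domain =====

-- B replaces A's sequential startswith scan (and the redundant openai_voices branch)
-- with a single 5-character slice and one set-membership test; objective: simpler.

-- ===== PORT A =====
-- the dict language_map as an association list in insertion order
def pvLanguageMap : List (String × String) :=
  [("zh-CN", "zh-CN"), ("zh-TW", "zh-TW"), ("zh-HK", "zh-HK"),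
   ("en-US", "en-US"), ("en-GB", "en-GB"), ("ja-JP", "ja-JP"),
   ("ko-KR", "ko-KR"), ("de-DE", "de-DE"), ("fr-FR", "fr-FR"),
   ("es-ES", "es-ES"), ("it-IT", "it-IT"), ("pt-BR", "pt-BR"),
   ("ru-RU", "ru-RU"), ("ar-SA", "ar-SA"), ("hi-IN", "hi-IN")]

-- the for-loop with early return over language_map.items()
def pvScan (voice : String) : List (String × String) → Option String
  | [] => none
  | (lang_code, lang) :: rest =>
      if PySem.Str.startswith voice lang_code then some lang else pvScan voice rest

def pvOpenaiVoices : List String := ["alloy", "echo", "fable", "onyx", "nova", "shimmer"]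

def get_language_from_voice (voice : String) : String :=
  match pvScan voice pvLanguageMap with
  | some lang => lang
  | none => if voice ∈ pvOpenaiVoices then "en-US" else "en-US"

-- ===== PORT B =====
-- the set _LANG_CODES (distinct elements)
def pvLangCodes : List String :=
  ["zh-CN", "zh-TW", "zh-HK", "en-US", "en-GB", "ja-JP", "ko-KR",
   "de-DE", "fr-FR", "es-ES", "it-IT", "pt-BR", "ru-RU", "ar-SA", "hi-IN"]

def get_language_from_voice_alt (voice : String) : String :=
  let pfx := PySem.Str.slice voice none (some 5)
  if pfx ∈ pvLangCodes then pfx else "en-US"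

-- ===== PRECONDITION & SPEC =====
def Spec_get_language_from_voice (voice : String) (out : String) : Prop := out = get_language_from_voice_alt voice
instance (voice : String) (out : String) : Decidable (Spec_get_language_from_voice voice out) := by unfold Spec_get_language_from_voice; infer_instance

-- ===== CLAIM (what is proved, stated in full; the proofs are below) =====
def Claim_equal_get_language_from_voice : Prop := ∀ (voice : String), Dom_get_language_from_voice voice → Spec_get_language_from_voice voice (get_language_from_voice voice)

-- ===== LEMMAS AND PROOFS =====

-- every code in A's map is 5 characters long, so 'voice.startswith code' is
-- 'voice.toList.take 5 = code.toList'
theorem startswith_eq_take (voice c : String) (h : c.toList.length = 5) :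
    PySem.Str.startswith voice c = (voice.toList.take 5 == c.toList) := by
  have hiff : PySem.Str.startswith voice c = true ↔
      (voice.toList.take 5 == c.toList) = true := by
    rw [beq_iff_eq]
    simp only [PySem.Str.startswith]
    rw [PySem.Chars.startswith_iff, List.prefix_iff_eq_take, ← h, eq_comm]
  exact Bool.eq_iff_iff.mpr hiff

-- A's scan over a map whose keys are all 5 chars and whose values equal the keys
-- is exactly a lookup of the 5-char prefix among the keys
theorem pvScan_eq_lookup (voice : String) (m : List (String × String))
    (h : ∀ p ∈ m, (p.1).toList.length = 5 ∧ p.2 = p.1) :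
    pvScan voice m =
      (if PySem.Str.slice voice none (some 5) ∈ m.map Prod.fst
       then some (PySem.Str.slice voice none (some 5)) else none) := by
  have hs : (PySem.Str.slice voice none (some 5)).toList = voice.toList.take 5 := by
    simpa using PySem.List.slice_to voice.toList (b := 5) (by norm_num)
  induction m with
  | nil => simp [pvScan]
  | cons p rest ih =>
    obtain ⟨c, l⟩ := p
    obtain ⟨hc5, hlc⟩ := h (c, l) (List.mem_cons_self ..)
    simp only at hc5 hlc
    subst hlc
    have hkey : PySem.Str.startswith voice l = (PySem.Str.slice voice none (some 5) == l) := by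
      rw [startswith_eq_take voice l hc5]
      rcases eq_or_ne (PySem.Str.slice voice none (some 5)) l with h2 | h2
      · have ht : voice.toList.take 5 = l.toList := by rw [← hs, h2]
        simp [h2, ht]
      · have hne : voice.toList.take 5 ≠ l.toList := fun hcon =>
          h2 (String.ext (hs.trans hcon))
        simp [h2, hne]
    rw [pvScan, hkey]
    rcases eq_or_ne (PySem.Str.slice voice none (some 5)) l with h2 | h2
    · simp [h2]
    · have hb : (PySem.Str.slice voice none (some 5) == l) = false := by
        simpa using h2
      rw [hb, if_neg (by simp), ih (fun q hq => h q (List.mem_cons_of_mem _ hq))]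
      by_cases hm : PySem.Str.slice voice none (some 5) ∈ List.map Prod.fst rest
      · simp [hm, List.mem_cons]
      · simp [hm, List.mem_cons, h2]

theorem get_language_from_voice_eq (voice : String) :
    get_language_from_voice voice = get_language_from_voice_alt voice := by
  rw [get_language_from_voice, get_language_from_voice_alt,
    pvScan_eq_lookup voice pvLanguageMap (by decide)]
  have hmap : pvLanguageMap.map Prod.fst = pvLangCodes := rfl
  rw [hmap]
  by_cases hm : PySem.Str.slice voice none (some 5) ∈ pvLangCodes <;> simp [hm]

-- ===== VERDICT (by name: the statement is the Claim_ definition above) =====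
theorem get_language_from_voice_spec : Claim_equal_get_language_from_voice := by
  intro voice _
  unfold Spec_get_language_from_voice
  exact get_language_from_voice_eq voice
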